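-- pv_equiv track=rewrite | github.com/MokhaLeee/fe8u-cskillsys-kernel | Tools/EventAssembler/Advance/FE8/fe8u-cskillsys-kernel/Tools/EventAssembler/Nintendo/Game Boy Advance/-Lex Talinus-/FE8RBeta/lt_engine/lt_engine/app/utilities/str_utils.py | matched_block_expr
-- ===== SOURCE A (Python) =====
-- def matched_block_expr(s: str, opener: str, closer: str):
--     # returns all strings bounded by balanced openers, closers
--     # inclduding content not found within the openers and closers
--     # e.g. "Hi{bac{def}jk}Waffle{lmno}" would return "[Hi, {bac{def}jk}, Waffle, {lmno}]""
--     assert opener != closer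
--     assert len(opener) == 1
--     assert len(closer) == 1
--     all_strs = []
--     curr = ""
--     unclosed = 0
--     for character in s:
--         if character == closer and unclosed > 0:
--             unclosed -= 1
--             curr += character
--             if unclosed == 0:
--                 all_strs.append(curr)
--                 curr = ""
--         elif character == opener:
--             if unclosed == 0:
--                 all_strs.append(curr)
--                 curr = ""
--             curr += character
--             unclosed += 1
--         else:
--             curr += character
--     return all_strs
-- ===== SOURCE B (Python) =====
-- def matched_block_expr(s: str, opener: str, closer: str):
--     # Two-phase: one scan collects top-level block boundaries, a second pass slices.
--     assert opener != closer
--     assert len(opener) == 1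
--     assert len(closer) == 1
--     bounds = []
--     depth = 0
--     for i, ch in enumerate(s):
--         if ch == opener:
--             if depth == 0:
--                 bounds.append(i)
--             depth += 1
--         elif ch == closer and depth > 0:
--             depth -= 1
--             if depth == 0:
--                 bounds.append(i + 1)
--     out = []
--     last = 0
--     for b in bounds:
--         out.append(s[last:b])
--         last = b
--     return out
-- ===== Notes on version B (the rewrite author's own statement) =====
-- stated objective: alternative
-- what changed: B replaces A's single pass that accumulates a growing current-segment string with two phases: a depth-counter scan that only records top-level boundary indices, followed by a slicing pass over those boundaries (which naturally drops the trailing unflushed text, as A does).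
import Mathlib
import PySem

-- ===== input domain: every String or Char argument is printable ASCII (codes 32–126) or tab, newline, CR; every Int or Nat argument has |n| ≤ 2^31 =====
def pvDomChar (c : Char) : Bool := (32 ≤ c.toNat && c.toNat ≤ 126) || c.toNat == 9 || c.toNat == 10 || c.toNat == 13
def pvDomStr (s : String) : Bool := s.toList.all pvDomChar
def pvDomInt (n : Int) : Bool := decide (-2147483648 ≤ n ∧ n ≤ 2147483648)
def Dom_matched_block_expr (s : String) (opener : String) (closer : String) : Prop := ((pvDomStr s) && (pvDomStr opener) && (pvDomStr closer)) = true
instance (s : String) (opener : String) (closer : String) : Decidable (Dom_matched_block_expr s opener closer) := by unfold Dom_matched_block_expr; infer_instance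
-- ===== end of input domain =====

-- B splits the work into a boundary-collecting scan plus a slicing pass instead of A's
-- single pass accumulating the current segment; equal return values proved on Pre_.

-- ===== PORT A =====
-- A's loop body; strings are carried as List Char (PySem's representation), state = (all_strs, curr, unclosed).
def mbeStepA (o cl : Char) (st : List (List Char) × List Char × Int) (ch : Char) : List (List Char) × List Char × Int :=
  if ch = cl ∧ st.2.2 > 0 then
    let un := st.2.2 - 1
    let curr := st.2.1 ++ [ch]
    if un = 0 then (st.1 ++ [curr], [], un) else (st.1, curr, un)
  else if ch = o then
    let ac := if st.2.2 = 0 then (st.1 ++ [st.2.1], ([] : List Char)) else (st.1, st.2.1)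
    (ac.1, ac.2 ++ [ch], st.2.2 + 1)
  else (st.1, st.2.1 ++ [ch], st.2.2)

def matched_block_expr (s : String) (opener : String) (closer : String) : List String :=
  -- the asserts: outside single-char distinct opener/closer Python raises AssertionError (outside Pre_)
  match opener.toList, closer.toList with
  | [o], [cl] =>
    if o = cl then []
    else ((s.toList.foldl (mbeStepA o cl) ([], [], 0)).1).map String.ofList
  | _, _ => []

-- ===== PORT B =====
-- phase 1 step: record a boundary at each top-level opener and just after each top-level closer
def mbeStep1 (o cl : Char) (st : List Int × Int) (p : Int × Char) : List Int × Int :=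
  if p.2 = o then
    (if st.2 = 0 then st.1 ++ [p.1] else st.1, st.2 + 1)
  else if p.2 = cl ∧ st.2 > 0 then
    let d := st.2 - 1
    (if d = 0 then st.1 ++ [p.1 + 1] else st.1, d)
  else st

-- phase 2 step: out.append(s[last:b]); last = b
def mbeStep2 (cs : List Char) (st : List (List Char) × Int) (b : Int) : List (List Char) × Int :=
  (st.1 ++ [PySem.List.slice cs (some st.2) (some b)], b)

def matched_block_expr_alt (s : String) (opener : String) (closer : String) : List String :=
  -- the asserts, as a guard: outside it Python raises AssertionError (outside Pre_)
  if opener = closer ∨ opener.toList.length ≠ 1 ∨ closer.toList.length ≠ 1 then []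
  else
    let o := opener.toList.headD ' '
    let cl := closer.toList.headD ' '
    let cs := s.toList
    let bounds := (PySem.List.enumerate cs 0).foldl (mbeStep1 o cl) ([], 0)
    ((bounds.1.foldl (mbeStep2 cs) ([], 0)).1).map String.ofList

-- ===== PRECONDITION & SPEC =====
-- Pre_ excludes exactly the inputs where A's asserts fail (AssertionError): opener/closer must be distinct single characters.
def Pre_matched_block_expr (s : String) (opener : String) (closer : String) : Prop :=
  opener ≠ closer ∧ opener.toList.length = 1 ∧ closer.toList.length = 1
instance (s : String) (opener : String) (closer : String) : Decidable (Pre_matched_block_expr s opener closer) := by unfold Pre_matched_block_expr; infer_instance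

def pvWitness_matched_block_expr : String × String × String := ("Hi{bac{def}jk}Waffle{lmno", "{", "}")

def Spec_matched_block_expr (s : String) (opener : String) (closer : String) (out : List String) : Prop := out = matched_block_expr_alt s opener closer
instance (s : String) (opener : String) (closer : String) (out : List String) : Decidable (Spec_matched_block_expr s opener closer out) := by unfold Spec_matched_block_expr; infer_instance

-- ===== CLAIM (what is proved, stated in full; the proofs are below) =====
def Claim_equal_matched_block_expr : Prop := ∀ (s : String) (opener : String) (closer : String), Dom_matched_block_expr s opener closer → Pre_matched_block_expr s opener closer → Spec_matched_block_expr s opener closer (matched_block_expr s opener closer)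

-- ===== LEMMAS AND PROOFS =====

-- phase 1 only appends to the boundary list: running it from (bs, d) is bs ++ the run from ([], d), same final depth
lemma mbeStep1_accum (o cl : Char) :
    ∀ (ps : List (Int × Char)) (bs : List Int) (d : Int),
      ps.foldl (mbeStep1 o cl) (bs, d)
        = (bs ++ (ps.foldl (mbeStep1 o cl) ([], d)).1, (ps.foldl (mbeStep1 o cl) ([], d)).2) := by
  intro ps
  induction ps with
  | nil => intro bs d; simp
  | cons p ps ih =>
    intro bs d
    simp only [List.foldl_cons]
    have hstep : ∀ (bs' : List Int), mbeStep1 o cl (bs', d) p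
        = (bs' ++ (mbeStep1 o cl ([], d) p).1, (mbeStep1 o cl ([], d) p).2) := by
      intro bs'
      unfold mbeStep1
      split_ifs <;> (simp; try split) <;> simp
    rw [hstep bs, hstep []]
    simp only [List.nil_append]
    rw [ih (bs ++ (mbeStep1 o cl ([], d) p).1) (mbeStep1 o cl ([], d) p).2,
        ih (mbeStep1 o cl ([], d) p).1 (mbeStep1 o cl ([], d) p).2]
    simp

-- s[li:b] for Nat li ≤ b is the slice of the prefix
lemma mbe_slice_sub (full : List Char) (li b : Nat) :
    PySem.List.slice full (some (li : Int)) (some (b : Int)) = (full.take b).drop li := by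
  rw [PySem.List.slice_natCast, List.drop_take]

-- the main invariant: A's fold from (all, s[li:i], d) produces the same list as
-- B's remaining boundaries (collected from index i at depth d) sliced from last = li onto all
lemma mbe_main (o cl : Char) (hne : o ≠ cl) (full : List Char) :
    ∀ (cs : List Char) (i li : Nat) (d : Int) (all : List (List Char)),
      full.drop i = cs → li ≤ i → i ≤ full.length → 0 ≤ d →
      (cs.foldl (mbeStepA o cl) (all, (full.take i).drop li, d)).1 =
      (((PySem.List.enumerate cs (i : Int)).foldl (mbeStep1 o cl) ([], d)).1.foldl
          (mbeStep2 full) (all, (li : Int))).1 := by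
  intro cs
  induction cs with
  | nil =>
    intro _ _ _ _ _ _ _ _
    simp [PySem.List.enumerate]
  | cons c cs ih =>
    intro i li d all hdrop hli hi hd
    have hilt : i < full.length := by
      by_contra h
      rw [List.drop_eq_nil_of_le (by omega)] at hdrop
      exact List.cons_ne_nil c cs hdrop.symm
    have hget : full[i]? = some c := by
      have h0 : (full.drop i)[0]? = some c := by rw [hdrop]; rfl
      rw [List.getElem?_drop] at h0
      simpa using h0
    have hdrop' : full.drop (i + 1) = cs := by
      rw [← List.tail_drop, hdrop]
      rfl
    have hsub : ∀ li' : Nat, li' ≤ i →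
        (full.take (i + 1)).drop li' = (full.take i).drop li' ++ [c] := by
      intro li' hli'
      rw [List.take_add_one, hget]
      rw [List.drop_append]
      simp [List.length_take, Nat.min_eq_left (le_of_lt hilt), Nat.sub_eq_zero_of_le hli']
    have hsub_self : (full.take (i + 1)).drop (i + 1) = [] :=
      List.drop_eq_nil_of_le (by simp)
    have hsub_i : (full.take i).drop i = [] :=
      List.drop_eq_nil_of_le (by simp)
    have hcast : (i : Int) + 1 = ((i + 1 : Nat) : Int) := by push_cast; ring
    rw [PySem.List.enumerate_cons]
    simp only [List.foldl_cons]
    by_cases h1 : c = cl ∧ 0 < d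
    · have hco : ¬ c = o := by rintro rfl; exact hne h1.1
      have hclo : ¬ cl = o := fun h => hne h.symm
      by_cases h2 : d - 1 = 0
      · have hA : mbeStepA o cl (all, (full.take i).drop li, d) c
            = (all ++ [(full.take (i + 1)).drop li], [], d - 1) := by
          simp [mbeStepA, h1.1, h1.2, h2, hsub li hli]
        have hB : mbeStep1 o cl ([], d) ((i : Int), c)
            = ([(i : Int) + 1], d - 1) := by
          simp [mbeStep1, hclo, h1.1, h1.2, h2]
        rw [hA, hB, mbeStep1_accum, List.foldl_append]
        simp only [List.foldl_cons, List.foldl_nil]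
        have hstep2 : mbeStep2 full (all, (li : Int)) ((i : Int) + 1)
            = (all ++ [(full.take (i + 1)).drop li], ((i + 1 : Nat) : Int)) := by
          rw [mbeStep2, hcast, mbe_slice_sub full li (i + 1)]
        rw [hstep2, hcast, h2]
        have := ih (i + 1) (i + 1) 0 (all ++ [(full.take (i + 1)).drop li])
          hdrop' (le_refl _) (by omega) (le_refl 0)
        rw [hsub_self] at this
        exact this
      · have hA : mbeStepA o cl (all, (full.take i).drop li, d) c
            = (all, (full.take (i + 1)).drop li, d - 1) := by
          simp [mbeStepA, h1.1, h1.2, h2, hsub li hli]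
        have hB : mbeStep1 o cl ([], d) ((i : Int), c) = ([], d - 1) := by
          simp [mbeStep1, hclo, h1.1, h1.2, h2]
        rw [hA, hB, hcast]
        exact ih (i + 1) li (d - 1) all hdrop' (by omega) (by omega) (by omega)
    · by_cases h3 : c = o
      · have hccl : ¬ (c = cl ∧ 0 < d) := h1
        by_cases h4 : d = 0
        · have hA : mbeStepA o cl (all, (full.take i).drop li, d) c
            = (all ++ [(full.take i).drop li], [c], d + 1) := by
            simp [mbeStepA, h3, hne, h4]
          have hB : mbeStep1 o cl ([], d) ((i : Int), c) = ([(i : Int)], d + 1) := by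
            simp [mbeStep1, h3, h4]
          rw [hA, hB, mbeStep1_accum, List.foldl_append]
          simp only [List.foldl_cons, List.foldl_nil]
          have hstep2 : mbeStep2 full (all, (li : Int)) ((i : Int))
              = (all ++ [(full.take i).drop li], ((i : Nat) : Int)) := by
            rw [mbeStep2, mbe_slice_sub full li i]
          rw [hstep2, hcast]
          have := ih (i + 1) i (d + 1) (all ++ [(full.take i).drop li])
            hdrop' (by omega) (by omega) (by omega)
          rw [hsub i (le_refl i), hsub_i] at this
          simpa using this
        · have hA : mbeStepA o cl (all, (full.take i).drop li, d) c
            = (all, (full.take (i + 1)).drop li, d + 1) := by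
            simp [mbeStepA, h3, hne, h4, hsub li hli]
          have hB : mbeStep1 o cl ([], d) ((i : Int), c) = ([], d + 1) := by
            simp [mbeStep1, h3, h4]
          rw [hA, hB, hcast]
          exact ih (i + 1) li (d + 1) all hdrop' (by omega) (by omega) (by omega)
      · have hA : mbeStepA o cl (all, (full.take i).drop li, d) c
            = (all, (full.take (i + 1)).drop li, d) := by
          simp [mbeStepA, h3, h1, hsub li hli]
        have hB : mbeStep1 o cl ([], d) ((i : Int), c) = ([], d) := by
          simp [mbeStep1, h3, h1]
        rw [hA, hB, hcast]
        exact ih (i + 1) li d all hdrop' (by omega) (by omega) hd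

-- ===== VERDICT (by name: the statement is the Claim_ definition above) =====
theorem matched_block_expr_spec : Claim_equal_matched_block_expr := by
  intro s opener closer _ hpre
  obtain ⟨hne, ho, hc⟩ := hpre
  unfold Spec_matched_block_expr matched_block_expr matched_block_expr_alt
  obtain ⟨o, ho'⟩ : ∃ o, opener.toList = [o] := by
    cases h : opener.toList with
    | nil => simp [h] at ho
    | cons a t => cases t with
      | nil => exact ⟨a, rfl⟩
      | cons b t' => simp [h] at ho
  obtain ⟨cl, hc'⟩ : ∃ cl, closer.toList = [cl] := by
    cases h : closer.toList with
    | nil => simp [h] at hc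
    | cons a t => cases t with
      | nil => exact ⟨a, rfl⟩
      | cons b t' => simp [h] at hc
  have hocl : o ≠ cl := by
    intro h
    apply hne
    apply String.toList_inj.mp
    rw [ho', hc', h]
  rw [ho', hc']
  have hguard : ¬ (opener = closer ∨ ([o] : List Char).length ≠ 1 ∨ ([cl] : List Char).length ≠ 1) := by
    simp [hne]
  simp only [if_neg hocl, if_neg hguard, List.headD_cons]
  have := mbe_main o cl hocl s.toList s.toList 0 0 0 [] (by simp) (by omega) (by simp) (by omega)
  simp only [List.take_zero, List.drop_nil, Nat.cast_zero] at this
  rw [this]
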